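-- pv_equiv track=rewrite | github.com/wendyzheng0/dailyleetcode | 2189_houseOfCards.py | houseOfCards
-- ===== SOURCE A (Python) =====
-- def houseOfCards(n: int) -> int:
--     # max triangles in bottom line
--     x = (n + 1) // 3
--     # dp[i][j], num of methods when bottom line contains <= i triangles and totally j cards
--     # dp[i][j] = dp[i - 1][j] + (dp[i - 1][j - (3 * i - 1)] if j >= 3 * i - 1 else 0)
--     dp = [0] * (n + 1)
--     dp[0] = 1
--     for i in range(1, x + 1):
--         y = i * 3 - 1
--         for j in range(n, y - 1, -1):
--             dp[j] = dp[j] + dp[j - y]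
--     return dp[n]
-- ===== SOURCE B (Python) =====
-- def houseOfCards(n: int) -> int:
--     # A subset of k parts p = 3*i - 1 (distinct i >= 1) summing to n is the same as a
--     # partition of (n + k) / 3 into k distinct positive integers, i.e. a partition of
--     # m = (n + k) // 3 - k*(k-1)//2 into exactly k positive parts.  Build the standard
--     # "partitions of m into exactly k parts" table and sum over the feasible k.
--     if n < 0:
--         return 0
--     # largest feasible k: the k smallest parts already sum to k*(3k+1)/2
--     kmax = 0
--     while (kmax + 1) * (3 * (kmax + 1) + 1) // 2 <= n:
--         kmax += 1
--     mmax = (n + kmax) // 3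
--     # P[m][k] = number of partitions of m into exactly k positive parts
--     P = [[0] * (kmax + 1) for _ in range(mmax + 1)]
--     P[0][0] = 1
--     for m in range(1, mmax + 1):
--         for k in range(1, kmax + 1):
--             P[m][k] = P[m - 1][k - 1] + (P[m - k][k] if m >= k else 0)
--     ans = 1 if n == 0 else 0
--     for k in range(1, kmax + 1):
--         if (n + k) % 3 == 0:
--             m = (n + k) // 3 - k * (k - 1) // 2
--             if m >= 0:
--                 ans += P[m][k]
--     return ans
-- ===== Notes on version B (the rewrite author's own statement) =====
-- stated objective: faster
-- what changed: Replaces A's dense bottom-up 0/1 subset-sum DP over the parts 2,5,...,3x-1 (an O(n) array updated for each part) by a number-theoretic reduction: a k-subset of parts 3i-1 summing to n is a partition of (n+k)/3 into k distinct positive integers, i.e. of (n+k)/3 - k(k-1)/2 into exactly k positive parts; B fills the standard partitions-into-exactly-k-parts table P[m][k] (m <= (n+kmax)/3, k <= kmax ~ sqrt(2n/3)) and sums P[(n+k)/3 - k(k-1)/2][k] over the feasible k with n+k divisible by 3.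
import Mathlib
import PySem

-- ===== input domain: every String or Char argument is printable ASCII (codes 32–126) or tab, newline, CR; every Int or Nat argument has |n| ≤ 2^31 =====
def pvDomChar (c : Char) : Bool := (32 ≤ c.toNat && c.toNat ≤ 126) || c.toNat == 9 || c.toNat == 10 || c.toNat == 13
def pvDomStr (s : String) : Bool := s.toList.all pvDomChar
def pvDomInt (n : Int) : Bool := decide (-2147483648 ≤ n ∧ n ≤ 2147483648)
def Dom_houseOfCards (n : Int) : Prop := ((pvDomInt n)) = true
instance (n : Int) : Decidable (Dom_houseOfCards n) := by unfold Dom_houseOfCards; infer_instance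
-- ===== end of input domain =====

-- B replaces A's O(n^2) bottom-up subset-sum DP over the parts 2,5,...,3x-1 by a number-theoretic
-- reduction: a k-subset of parts summing to n is a partition of (n+k)/3 into k distinct positive
-- integers, i.e. of (n+k)/3 - k(k-1)/2 into exactly k positive parts; B fills the standard
-- partitions-into-exactly-k-parts table (O(n*sqrt(n)) entries) and sums over feasible k.

-- ===== PORT A =====
-- Python list indexing: inside Pre_ every index used here is in range (j runs over [y, n], y ≥ 2),
-- so dp[j] reads/writes are ported as Array getD/setIfInBounds at the nonnegative index j.toNat;
-- an Array holds the dp values for O(1) indexing (a Lean List would make evaluation quadratic per read).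
def houseOfCards (n : Int) : Int :=
  let x := PySem.Int.floordiv (n + 1) 3
  let dp0 := (List.replicate (n + 1).toNat (0 : Int)).toArray.setIfInBounds 0 1
  let dp := (PySem.List.pyRange 1 (x + 1) 1).foldl (fun dp i =>
      let y := i * 3 - 1
      (PySem.List.pyRange n (y - 1) (-1)).foldl (fun (d : Array Int) j =>
          d.setIfInBounds j.toNat (d.getD j.toNat 0 + d.getD (j - y).toNat 0)) dp) dp0
  PySem.List.pyGetD dp.toList n 0

-- ===== PORT B =====
-- the while-loop needs this bound for termination (the loop counter stays below n)
theorem bKmax_cond_le (n : Int) (k : Nat)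
    (h : PySem.Int.floordiv (((k : Int) + 1) * (3 * ((k : Int) + 1) + 1)) 2 ≤ n) :
    (k : Int) + 1 ≤ n := by
  have hb := (PySem.Int.floordiv_eq_iff_of_pos (by omega : (0:Int) < 2)).mp
    (rfl : PySem.Int.floordiv (((k : Int) + 1) * (3 * ((k : Int) + 1) + 1)) 2
         = PySem.Int.floordiv (((k : Int) + 1) * (3 * ((k : Int) + 1) + 1)) 2)
  have hk : (0:Int) ≤ (k : Int) := by positivity
  have hP : 2 * ((k:Int) + 1) + ((k:Int) + 1) * (3 * (k:Int) + 2)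
      = ((k : Int) + 1) * (3 * ((k : Int) + 1) + 1) := by ring
  have hnn : (0:Int) ≤ ((k:Int) + 1) * (3 * (k:Int) + 2) :=
    mul_nonneg (by omega) (by omega)
  omega

-- while (kmax+1)*(3*(kmax+1)+1)//2 <= n: kmax += 1   (kmax is a nonnegative counter: Nat)
def bKmax (n : Int) (k : Nat) : Nat :=
  if h : PySem.Int.floordiv (((k : Int) + 1) * (3 * ((k : Int) + 1) + 1)) 2 ≤ n then
    bKmax n (k + 1)
  else k
termination_by (n + 1 - k).toNat
decreasing_by
  have := bKmax_cond_le n k h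
  omega

-- the table-fill and summation loops; every index written/read is in range (0 ≤ m ≤ mmax,
-- 0 ≤ k ≤ kmax), so Python's P[m][k] is ported as Array getD/setIfInBounds at .toNat indices
def houseOfCards_alt (n : Int) : Int :=
  if n < 0 then 0
  else
    let kmax := bKmax n 0
    let mmax := PySem.Int.floordiv (n + (kmax : Int)) 3
    let P0 : Array (Array Int) :=
      Array.replicate (mmax + 1).toNat (Array.replicate (kmax + 1) (0 : Int))
    let P1 := P0.setIfInBounds 0 ((P0.getD 0 #[]).setIfInBounds 0 1)
    let P := (PySem.List.pyRange 1 (mmax + 1) 1).foldl (fun P m =>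
        (PySem.List.pyRange 1 ((kmax : Int) + 1) 1).foldl (fun (P : Array (Array Int)) k =>
          P.setIfInBounds m.toNat ((P.getD m.toNat #[]).setIfInBounds k.toNat
            ((P.getD (m - 1).toNat #[]).getD (k - 1).toNat 0 +
              (if k ≤ m then (P.getD (m - k).toNat #[]).getD k.toNat 0 else 0)))) P) P1
    let ans : Int := if n = 0 then 1 else 0
    (PySem.List.pyRange 1 ((kmax : Int) + 1) 1).foldl (fun ans k =>
      if PySem.Int.mod (n + k) 3 = 0 then
        let m := PySem.Int.floordiv (n + k) 3 - PySem.Int.floordiv (k * (k - 1)) 2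
        if 0 ≤ m then ans + (P.getD m.toNat #[]).getD k.toNat 0 else ans
      else ans) ans

-- ===== PRECONDITION & SPEC =====
-- Pre_ excludes exactly the inputs n < 0, on which A raises IndexError (dp = [0]*(n+1) is empty, so dp[0] = 1 fails)
def Pre_houseOfCards (n : Int) : Prop := 0 ≤ n
instance (n : Int) : Decidable (Pre_houseOfCards n) := by unfold Pre_houseOfCards; infer_instance
def pvWitness_houseOfCards : Int := (5)

def Spec_houseOfCards (n : Int) (out : Int) : Prop := out = houseOfCards_alt n
instance (n : Int) (out : Int) : Decidable (Spec_houseOfCards n out) := by unfold Spec_houseOfCards; infer_instance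

-- ===== CLAIM (what is proved, stated in full; the proofs are below) =====
def Claim_equal_houseOfCards : Prop := ∀ (n : Int), Dom_houseOfCards n → Pre_houseOfCards n → Spec_houseOfCards n (houseOfCards n)

-- ===== LEMMAS AND PROOFS =====
-- number of subsets of the parts list summing to s (shared characterisation of both ports)
def countW : List Int → Int → Int
  | [], s => if s = 0 then 1 else 0
  | y :: ys, s => countW ys s + countW ys (s - y)

theorem countW_neg (ps : List Int) (hpos : ∀ p ∈ ps, 0 < p) :
    ∀ s : Int, s < 0 → countW ps s = 0 := by
  induction ps with
  | nil => intro s hs; simp [countW]; omega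
  | cons y ys ih =>
    intro s hs
    have hy : 0 < y := hpos y (by simp)
    have h1 := ih (fun p hp => hpos p (by simp [hp])) s hs
    have h2 := ih (fun p hp => hpos p (by simp [hp])) (s - y) (by omega)
    simp [countW, h1, h2]

theorem countW_snoc (y : Int) : ∀ (ps : List Int) (s : Int),
    countW (ps ++ [y]) s = countW ps s + countW ps (s - y) := by
  intro ps
  induction ps with
  | nil => intro s; simp [countW]
  | cons p ps ih =>
    intro s
    simp only [List.cons_append, countW, ih s, ih (s - p)]
    have : s - p - y = s - y - p := by ring
    rw [this]; ring

theorem parts_pos (k : Int) : ∀ p ∈ (PySem.List.pyRange 1 k 1).map (fun i => i * 3 - 1), 0 < p := by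
  intro p hp
  simp only [List.mem_map] at hp
  obtain ⟨i, hi, rfl⟩ := hp
  have := PySem.List.mem_pyRange_one.mp hi
  omega

-- ---------- A side: houseOfCards n = countW [2, 5, ..., 3x-1] n ----------

def stepA (n : Int) (dp : List Int) (i : Int) : List Int :=
  (PySem.List.pyRange n (i * 3 - 1 - 1) (-1)).foldl
    (fun d j => PySem.List.pySetD d j (PySem.List.pyGetD d j 0 + PySem.List.pyGetD d (j - (i * 3 - 1)) 0)) dp

theorem inner_spec (y : Int) (hy : 2 ≤ y) :
    ∀ (K : Nat) (m : Int) (dp : List Int), m - (y - 1) ≤ K → m < (dp.length : Int) →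
    (((PySem.List.pyRange m (y - 1) (-1)).foldl (fun d j =>
        PySem.List.pySetD d j (PySem.List.pyGetD d j 0 + PySem.List.pyGetD d (j - y) 0)) dp).length = dp.length)
    ∧ ∀ t : Nat, t < dp.length →
      ((PySem.List.pyRange m (y - 1) (-1)).foldl (fun d j =>
        PySem.List.pySetD d j (PySem.List.pyGetD d j 0 + PySem.List.pyGetD d (j - y) 0)) dp).getD t 0
      = dp.getD t 0 + (if y ≤ (t : Int) ∧ (t : Int) ≤ m then dp.getD (t - y.toNat) 0 else 0) := by
  intro K
  induction K with
  | zero =>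
    intro m dp hK hm
    rw [PySem.List.pyRange_neg_one_eq_nil (by omega)]
    constructor
    · rfl
    · intro t ht
      have : ¬ (y ≤ (t : Int) ∧ (t : Int) ≤ m) := by omega
      simp [this]
  | succ K ih =>
    intro m dp hK hm
    by_cases hcase : m ≤ y - 1
    · rw [PySem.List.pyRange_neg_one_eq_nil (by omega)]
      constructor
      · rfl
      · intro t ht
        have : ¬ (y ≤ (t : Int) ∧ (t : Int) ≤ m) := by omega
        simp [this]
    · have hym : y ≤ m := by omega
      have hm0 : 0 ≤ m := by omega
      rw [PySem.List.pyRange_neg_one_cons (by omega)]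
      simp only [List.foldl_cons]
      set v := PySem.List.pyGetD dp m 0 + PySem.List.pyGetD dp (m - y) 0 with hv
      have hset : PySem.List.pySetD dp m v = dp.set m.toNat v := PySem.List.pySetD_of_nonneg dp v hm0
      have hlen1 : (dp.set m.toNat v).length = dp.length := by simp
      have hIH := ih (m - 1) (dp.set m.toNat v) (by omega) (by rw [hlen1]; omega)
      rw [hset] at *
      refine ⟨by rw [hIH.1, hlen1], ?_⟩
      intro t ht
      rw [hIH.2 t (by rw [hlen1]; exact ht)]
      have hmN : (m.toNat : Int) = m := Int.toNat_of_nonneg hm0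
      have hgets : ∀ (u : Nat), u < dp.length → (dp.set m.toNat v).getD u 0 = if u = m.toNat then v else dp.getD u 0 := by
        intro u hu
        simp only [List.getD_eq_getElem?_getD, List.getElem?_set]
        rcases eq_or_ne u m.toNat with h|h
        · subst h; simp [hu]
        · simp [h, Ne.symm h]
      by_cases hteq : t = m.toNat
      · subst hteq
        have h1 : ¬ ((y : Int) ≤ (m.toNat : Int) ∧ (m.toNat : Int) ≤ m - 1) := by omega
        have h2 : (y ≤ (m.toNat : Int) ∧ (m.toNat : Int) ≤ m) := by omega
        rw [hgets m.toNat ht]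
        simp only [if_neg h1, if_pos h2, add_zero]
        rw [hv]
        have e1 : PySem.List.pyGetD dp m 0 = dp.getD m.toNat 0 := by
          rw [PySem.List.pyGetD_of_nonneg dp 0 hm0]
        have e2 : PySem.List.pyGetD dp (m - y) 0 = dp.getD (m.toNat - y.toNat) 0 := by
          rw [PySem.List.pyGetD_of_nonneg dp 0 (by omega : (0:Int) ≤ m - y)]
          congr 1
          omega
        rw [e1, e2]
        simp
      · rw [hgets t ht, if_neg hteq]
        have htm : (t : Int) ≠ m := by omega
        by_cases hc2 : y ≤ (t : Int) ∧ (t : Int) ≤ m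
        · have hc : y ≤ (t : Int) ∧ (t : Int) ≤ m - 1 := ⟨hc2.1, by omega⟩
          rw [if_pos hc, if_pos hc2, hgets (t - y.toNat) (by omega), if_neg (by omega)]
        · rw [if_neg (fun hc => hc2 ⟨hc.1, by omega⟩), if_neg hc2]

theorem outer_spec (n : Int) (hn : 0 ≤ n) : ∀ K : Nat,
    (((PySem.List.pyRange 1 (1 + (K : Int)) 1).foldl (stepA n)
        (PySem.List.pySetD (List.replicate (n + 1).toNat (0 : Int)) 0 1)).length = (n + 1).toNat)
    ∧ ∀ t : Nat, t < (n + 1).toNat →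
      ((PySem.List.pyRange 1 (1 + (K : Int)) 1).foldl (stepA n)
        (PySem.List.pySetD (List.replicate (n + 1).toNat (0 : Int)) 0 1)).getD t 0
      = countW ((PySem.List.pyRange 1 (1 + (K : Int)) 1).map (fun i => i * 3 - 1)) t := by
  have hdp0 : PySem.List.pySetD (List.replicate (n + 1).toNat (0 : Int)) 0 1
      = (List.replicate (n + 1).toNat (0 : Int)).set 0 1 :=
    PySem.List.pySetD_of_nonneg _ 1 (by omega)
  intro K
  induction K with
  | zero =>
    rw [hdp0]
    constructor
    · simp
    · intro t ht
      norm_num [PySem.List.pyRange_one_eq_nil (by omega : (1:Int) + 0 ≤ 1)]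
      rcases Nat.eq_zero_or_pos t with h|h
      · subst h
        simp [countW, List.getD_eq_getElem?_getD, List.getElem?_set, ht]
      · have h0 : (0:Nat) ≠ t := by omega
        have h1 : ((t:Nat):Int) ≠ 0 := by omega
        simp [countW, List.getD_eq_getElem?_getD, List.getElem?_set, h0, h1,
          List.getElem?_replicate, ht]
        omega
  | succ K ih =>
    have hsplit : PySem.List.pyRange 1 (1 + ((K:Int) + 1)) 1
        = PySem.List.pyRange 1 (1 + (K:Int)) 1 ++ [1 + (K:Int)] := by
      have : (1 + ((K:Int) + 1)) = (1 + (K:Int)) + 1 := by ring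
      rw [this, PySem.List.pyRange_one_succ_right (by omega)]
    push_cast
    rw [hsplit, List.foldl_append, List.map_append]
    set dpK := (PySem.List.pyRange 1 (1 + (K : Int)) 1).foldl (stepA n)
        (PySem.List.pySetD (List.replicate (n + 1).toNat (0 : Int)) 0 1) with hdpK
    set ps := (PySem.List.pyRange 1 (1 + (K : Int)) 1).map (fun i => i * 3 - 1) with hps
    obtain ⟨ihlen, ihget⟩ := ih
    set y := (1 + (K:Int)) * 3 - 1 with hy
    have hy2 : 2 ≤ y := by omega
    have hpos : ∀ p ∈ ps, 0 < p := parts_pos _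
    have hinner := inner_spec y hy2 (n - (y - 1)).toNat n dpK (by omega)
      (by rw [ihlen]; omega)
    simp only [List.foldl_cons, List.foldl_nil]
    have hstep : stepA n dpK (1 + (K:Int))
        = (PySem.List.pyRange n (y - 1) (-1)).foldl (fun d j =>
            PySem.List.pySetD d j (PySem.List.pyGetD d j 0 + PySem.List.pyGetD d (j - y) 0)) dpK := rfl
    rw [hstep]
    refine ⟨by rw [hinner.1, ihlen], ?_⟩
    intro t ht
    rw [hinner.2 t (by rw [ihlen]; exact ht)]
    have htn : (t : Int) ≤ n := by omega
    rw [show List.map (fun i : Int => i * 3 - 1) [1 + (K:Int)] = [y] from by simp [hy],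
      countW_snoc, ihget t ht]
    by_cases hc : y ≤ (t : Int)
    · rw [if_pos ⟨hc, htn⟩]
      have hcast : ((t - y.toNat : Nat) : Int) = (t : Int) - y := by omega
      rw [ihget (t - y.toNat) (by omega), hcast]
    · rw [if_neg (fun h => hc h.1)]
      rw [countW_neg ps hpos ((t:Int) - y) (by omega)]

theorem getD_toList (a : Array Int) (k : Nat) : a.toList.getD k 0 = a.getD k 0 := by
  rw [List.getD_eq_getElem?_getD, Array.getD_eq_getD_getElem?, Array.getElem?_toList]

theorem bridge_inner (y : Int) (hy : 0 < y) : ∀ (R : List Int), (∀ j ∈ R, y ≤ j) → ∀ (a : Array Int),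
    (R.foldl (fun (d : Array Int) j =>
        d.setIfInBounds j.toNat (d.getD j.toNat 0 + d.getD (j - y).toNat 0)) a).toList
    = R.foldl (fun d j =>
        PySem.List.pySetD d j (PySem.List.pyGetD d j 0 + PySem.List.pyGetD d (j - y) 0)) a.toList := by
  intro R
  induction R with
  | nil => intro _ a; rfl
  | cons j R ih =>
    intro hR a
    have hj : y ≤ j := hR j (by simp)
    simp only [List.foldl_cons]
    rw [ih (fun j hj => hR j (by simp [hj]))]
    congr 1
    rw [PySem.List.pySetD_of_nonneg _ _ (by omega : (0:Int) ≤ j),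
      PySem.List.pyGetD_of_nonneg _ 0 (by omega : (0:Int) ≤ j),
      PySem.List.pyGetD_of_nonneg _ 0 (by omega : (0:Int) ≤ j - y),
      Array.toList_setIfInBounds, getD_toList, getD_toList]

theorem bridge_outer (n : Int) : ∀ (S : List Int), (∀ i ∈ S, 1 ≤ i) → ∀ (a : Array Int),
    (S.foldl (fun dp i =>
        (PySem.List.pyRange n (i * 3 - 1 - 1) (-1)).foldl (fun (d : Array Int) j =>
          d.setIfInBounds j.toNat (d.getD j.toNat 0 + d.getD ((j - (i * 3 - 1)).toNat) 0)) dp) a).toList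
    = S.foldl (stepA n) a.toList := by
  intro S
  induction S with
  | nil => intro _ a; rfl
  | cons i S ih =>
    intro hS a
    have hi : 1 ≤ i := hS i (by simp)
    simp only [List.foldl_cons]
    rw [ih (fun i hi => hS i (by simp [hi]))]
    congr 1
    exact bridge_inner (i * 3 - 1) (by omega) _
      (fun j hj => by
        have := PySem.List.mem_pyRange_neg_one.mp hj
        omega) a

theorem portA_list (n : Int) : houseOfCards n = PySem.List.pyGetD
    ((PySem.List.pyRange 1 (PySem.Int.floordiv (n + 1) 3 + 1) 1).foldl (stepA n)
      (PySem.List.pySetD (List.replicate (n + 1).toNat (0 : Int)) 0 1)) n 0 := by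
  have h2 : ((List.replicate (n + 1).toNat (0 : Int)).toArray.setIfInBounds 0 1).toList
      = PySem.List.pySetD (List.replicate (n + 1).toNat (0 : Int)) 0 1 := by
    rw [Array.toList_setIfInBounds,
      PySem.List.pySetD_of_nonneg (List.replicate (n + 1).toNat (0 : Int)) 1 (by omega : (0:Int) ≤ 0)]
    simp
  have h := bridge_outer n (PySem.List.pyRange 1 (PySem.Int.floordiv (n + 1) 3 + 1) 1)
    (fun i hi => (PySem.List.mem_pyRange_one.mp hi).1)
    ((List.replicate (n + 1).toNat (0 : Int)).toArray.setIfInBounds 0 1)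
  rw [h2] at h
  exact congrArg (fun l => PySem.List.pyGetD l n 0) h

theorem mainA (n : Int) (hn : 0 ≤ n) :
    houseOfCards n = countW
      ((PySem.List.pyRange 1 (PySem.Int.floordiv (n + 1) 3 + 1) 1).map (fun i => i * 3 - 1)) n := by
  have hx := (PySem.Int.floordiv_eq_iff_of_pos (by omega : (0:Int) < 3)).mp
    (rfl : PySem.Int.floordiv (n + 1) 3 = PySem.Int.floordiv (n + 1) 3)
  set x := PySem.Int.floordiv (n + 1) 3 with hxdef
  have hx0 : 0 ≤ x := by omega
  have hcast : x + 1 = 1 + ((x.toNat : Nat) : Int) := by omega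
  have hout := outer_spec n hn x.toNat
  rw [portA_list, hcast, PySem.List.pyGetD_of_nonneg _ 0 hn, hout.2 n.toNat (by omega),
    show ((n.toNat : Nat) : Int) = n from by omega]

-- ---------- B side: partition-count characterisation ----------

-- triangular numbers: c2 k = k*(k-1)/2
def c2 : Nat → Nat
  | 0 => 0
  | k + 1 => c2 k + k

-- partitions of m into exactly k positive parts (B's table recurrence)
def PP (m : Int) (k : Nat) : Int :=
  if m < 0 then 0
  else match k with
    | 0 => if m = 0 then 1 else 0
    | k' + 1 => PP (m - 1) k' + PP (m - ((k' : Int) + 1)) (k' + 1)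
termination_by (m + 1).toNat
decreasing_by all_goals omega

-- k-subsets of {1, ..., j} summing to M
def QD : Nat → Int → Nat → Int
  | 0, M, k => if M = 0 ∧ k = 0 then 1 else 0
  | j + 1, M, k => QD j M k +
      (match k with
       | 0 => 0
       | k' + 1 => QD j (M - ((j : Int) + 1)) k')

-- k-subsets of the first j parts 3*i-1 summing to s
def T : Nat → Int → Nat → Int
  | 0, s, k => if s = 0 ∧ k = 0 then 1 else 0
  | j + 1, s, k => T j s k +
      (match k with
       | 0 => 0
       | k' + 1 => T j (s - (3 * ((j : Int) + 1) - 1)) k')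

-- all subsets of the first j parts summing to s
def W : Nat → Int → Int
  | 0, s => if s = 0 then 1 else 0
  | j + 1, s => W j s + W j (s - (3 * ((j : Int) + 1) - 1))

-- definitional unfoldings (the three functions are structural recursions)
theorem W_succ (j : Nat) (s : Int) : W (j+1) s = W j s + W j (s - (3*((j:Int)+1)-1)) := rfl
theorem W_zero (s : Int) : W 0 s = if s = 0 then 1 else 0 := rfl
theorem T_zero (s : Int) (k : Nat) : T 0 s k = if s = 0 ∧ k = 0 then 1 else 0 := rfl
theorem T_succ (j : Nat) (s : Int) (k : Nat) : T (j+1) s k = T j s k +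
    (match k with | 0 => 0 | k' + 1 => T j (s - (3*((j:Int)+1)-1)) k') := rfl
theorem T_succ_succ (j : Nat) (s : Int) (k' : Nat) :
    T (j+1) s (k'+1) = T j s (k'+1) + T j (s - (3*((j:Int)+1)-1)) k' := rfl
theorem T_succ_zero (j : Nat) (s : Int) : T (j+1) s 0 = T j s 0 + 0 := rfl
theorem QD_zero (M : Int) (k : Nat) : QD 0 M k = if M = 0 ∧ k = 0 then 1 else 0 := rfl
theorem QD_succ_succ (j : Nat) (M : Int) (k' : Nat) :
    QD (j+1) M (k'+1) = QD j M (k'+1) + QD j (M - ((j:Int)+1)) k' := rfl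
theorem QD_succ_zero (j : Nat) (M : Int) : QD (j+1) M 0 = QD j M 0 + 0 := rfl
theorem PP_zero (m : Int) : PP m 0 = if m < 0 then 0 else if m = 0 then 1 else 0 := by rw [PP]
theorem PP_succ (m : Int) (k' : Nat) :
    PP m (k'+1) = if m < 0 then 0 else PP (m-1) k' + PP (m - ((k':Int)+1)) (k'+1) := by rw [PP]
theorem PP_neg (m : Int) (k : Nat) (h : m < 0) : PP m k = 0 := by
  cases k with
  | zero => rw [PP_zero, if_pos h]
  | succ k' => rw [PP_succ, if_pos h]

theorem countW_prefix : ∀ j : Nat, ∀ s : Int,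
    countW ((PySem.List.pyRange 1 ((j : Int) + 1) 1).map (fun i => i * 3 - 1)) s = W j s := by
  intro j
  induction j with
  | zero =>
    intro s
    rw [show ((0:Nat):Int) + 1 = 1 from by norm_num, PySem.List.pyRange_one_eq_nil (by omega)]
    simp [countW, W_zero]
  | succ j ih =>
    intro s
    rw [show ((j+1:Nat):Int) + 1 = ((j:Int) + 1) + 1 from by push_cast; ring,
      PySem.List.pyRange_one_succ_right (by omega), List.map_append, List.map_cons, List.map_nil,
      countW_snoc, ih s, ih (s - (((j:Int) + 1) * 3 - 1)), W_succ,
      show 3 * ((j:Int) + 1) - 1 = ((j:Int) + 1) * 3 - 1 from by ring]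

theorem T_k0 (j : Nat) (s : Int) : T j s 0 = if s = 0 then 1 else 0 := by
  induction j with
  | zero => rw [T_zero]; simp
  | succ j ih => rw [T_succ_zero, add_zero, ih]

theorem T_gt : ∀ j : Nat, ∀ (s : Int) (k : Nat), j < k → T j s k = 0 := by
  intro j
  induction j with
  | zero =>
    intro s k hk
    rw [T_zero, if_neg (by omega : ¬ (s = 0 ∧ k = 0))]
  | succ j ih =>
    intro s k hk
    match k, hk with
    | k' + 1, hk =>
      rw [T_succ_succ, ih s (k' + 1) (by omega), ih _ k' (by omega), add_zero]

theorem W_eq_sumT : ∀ j : Nat, ∀ s : Int, W j s = ∑ k ∈ Finset.range (j + 1), T j s k := by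
  intro j
  induction j with
  | zero =>
    intro s
    rw [Finset.sum_range_one, W_zero, T_zero]
    simp
  | succ j ih =>
    intro s
    rw [Finset.sum_congr rfl (fun k _ => T_succ j s k), Finset.sum_add_distrib,
      Finset.sum_range_succ _ (j+1), T_gt j s (j+1) (by omega), add_zero, ← ih s,
      Finset.sum_range_succ']
    have hred : ∀ x : Nat,
        (match x + 1 with | 0 => (0:Int) | k' + 1 => T j (s - (3*((j:Int)+1)-1)) k')
          = T j (s - (3*((j:Int)+1)-1)) x := fun _ => rfl
    have hred0 : (match (0:Nat) with | 0 => (0:Int) | k' + 1 => T j (s - (3*((j:Int)+1)-1)) k') = 0 := rfl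
    rw [Finset.sum_congr rfl (fun x _ => hred x), hred0, add_zero,
      ← ih (s - (3*((j:Int)+1)-1)), W_succ]

theorem T_eq_QD : ∀ j : Nat, ∀ (M : Int) (k : Nat), T j (3 * M - (k : Int)) k = QD j M k := by
  intro j
  induction j with
  | zero =>
    intro M k
    rw [T_zero, QD_zero]
    by_cases h : M = 0 ∧ k = 0
    · obtain ⟨rfl, rfl⟩ := h; norm_num
    · rw [if_neg (by omega), if_neg h]
  | succ j ih =>
    intro M k
    cases k with
    | zero => rw [T_succ_zero, QD_succ_zero, ih M 0]
    | succ k' =>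
      rw [T_succ_succ, QD_succ_succ, ih M (k' + 1),
        show 3 * M - ((k' + 1 : Nat) : Int) - (3 * ((j : Int) + 1) - 1)
          = 3 * (M - ((j:Int) + 1)) - (k' : Int) from by push_cast; ring, ih]

theorem T_ndvd : ∀ j : Nat, ∀ (s : Int) (k : Nat), ¬ ((3:Int) ∣ (s + k)) → T j s k = 0 := by
  intro j
  induction j with
  | zero =>
    intro s k h
    rw [T_zero, if_neg]
    rintro ⟨rfl, rfl⟩
    exact h (by simp)
  | succ j ih =>
    intro s k h
    cases k with
    | zero => rw [T_succ_zero, ih s 0 h, add_zero]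
    | succ k' =>
      rw [T_succ_succ, ih s (k' + 1) h, ih _ k' (by push_cast at h ⊢; omega), add_zero]

theorem QD_neg : ∀ j : Nat, ∀ (M : Int) (k : Nat), M < 0 → QD j M k = 0 := by
  intro j
  induction j with
  | zero => intro M k h; rw [QD_zero, if_neg (by omega : ¬ (M = 0 ∧ k = 0))]
  | succ j ih =>
    intro M k h
    cases k with
    | zero => rw [QD_succ_zero, ih M 0 h, add_zero]
    | succ k' => rw [QD_succ_succ, ih M (k' + 1) h, ih _ k' (by omega), add_zero]

theorem QD_k0 : ∀ j : Nat, ∀ M : Int, QD j M 0 = if M = 0 then 1 else 0 := by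
  intro j
  induction j with
  | zero => intro M; rw [QD_zero]; simp
  | succ j ih => intro M; rw [QD_succ_zero, add_zero, ih]

theorem QD_gt : ∀ j : Nat, ∀ (k : Nat) (M : Int), j < k → QD j M k = 0 := by
  intro j
  induction j with
  | zero => intro k M hk; rw [QD_zero, if_neg (by omega : ¬ (M = 0 ∧ k = 0))]
  | succ j ih =>
    intro k M hk
    match k, hk with
    | k' + 1, hk =>
      rw [QD_succ_succ, ih (k' + 1) M (by omega), ih k' _ (by omega), add_zero]

theorem QD_vanish : ∀ j : Nat, ∀ (M : Int) (k : Nat), M < (c2 (k + 1) : Int) → QD j M k = 0 := by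
  intro j
  induction j with
  | zero =>
    intro M k h
    rw [QD_zero, if_neg]
    rintro ⟨rfl, rfl⟩
    norm_num [c2] at h
  | succ j ih =>
    intro M k h
    cases k with
    | zero => rw [QD_succ_zero, ih M 0 h, add_zero]
    | succ k' =>
      rw [QD_succ_succ, ih M (k' + 1) h]
      by_cases hkj : k' ≤ j
      · rw [ih _ k' ?_, add_zero]
        have hc : c2 (k' + 2) = c2 (k' + 1) + (k' + 1) := rfl
        rw [hc] at h
        push_cast at h ⊢
        omega
      · rw [QD_gt j k' _ (by omega), add_zero]

theorem QD_cap (j : Nat) (M : Int) (k : Nat) (h : 3 * M - (k : Int) ≤ 3 * (j : Int) + 1) :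
    QD (j + 1) M k = QD j M k := by
  cases k with
  | zero => rw [QD_succ_zero, add_zero]
  | succ k' =>
    rw [QD_succ_succ]
    have hc : c2 (k' + 1) = c2 k' + k' := rfl
    have hge : (k' : Int) ≤ (c2 (k' + 1) : Int) := by rw [hc]; push_cast; omega
    have hlt : M - ((j:Int) + 1) < (c2 (k' + 1) : Int) := by push_cast at h ⊢; omega
    rw [QD_vanish j _ k' hlt, add_zero]

theorem QD_lift (M : Int) (k : Nat) : ∀ d : Nat, ∀ j : Nat, (3 * M - (k : Int) ≤ 3 * (j : Int) + 1) →
    QD (j + d) M k = QD j M k := by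
  intro d
  induction d with
  | zero => intro j _; rfl
  | succ d ih =>
    intro j h
    show QD ((j + d) + 1) M k = QD j M k
    rw [QD_cap (j + d) M k (by push_cast at h ⊢; omega), ih j h]

theorem QD_shift : ∀ j : Nat, ∀ (M : Int) (k : Nat),
    QD (j + 1) M (k + 1) = QD j (M - ((k : Int) + 1)) k + QD j (M - ((k : Int) + 1)) (k + 1) := by
  intro j
  induction j with
  | zero =>
    intro M k
    rw [QD_succ_succ, show ((0:Nat):Int) + 1 = 1 from by norm_num]
    simp only [QD_zero]
    norm_num
    split_ifs <;> omega
  | succ j ih =>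
    intro M k
    have hcast : ((j + 1 : Nat) : Int) + 1 = (j : Int) + 2 := by push_cast; ring
    rw [QD_succ_succ, hcast, ih M k]
    cases k with
    | zero =>
      rw [QD_k0, QD_succ_succ, QD_k0, QD_k0, QD_k0,
        show M - (((0:Nat):Int) + 1) - ((j:Int) + 1) = M - ((j:Int) + 2) from by push_cast; ring]
      ring
    | succ k'' =>
      rw [ih (M - ((j:Int) + 2)) k'', QD_succ_succ, QD_succ_succ,
        show M - ((j:Int) + 2) - (((k'':Nat):Int) + 1) = M - (((k''+1:Nat):Int) + 1) - ((j:Int) + 1)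
          from by push_cast; ring]
      ring

theorem QD_eq_PP : ∀ (k : Nat), ∀ (mt : Nat), ∀ (M : Int) (J : Nat), M.toNat = mt →
    M + (k : Int) ≤ (J : Int) → QD J M k = PP (M - (c2 k : Int)) k := by
  intro k
  induction k with
  | zero =>
    intro mt M J _ _
    rw [QD_k0, PP_zero]
    simp only [c2, Nat.cast_zero, sub_zero]
    split_ifs <;> omega
  | succ k ihk =>
    intro mt
    induction mt using Nat.strong_induction_on with
    | _ mt ihm =>
      intro M J hmt hJ
      have hc : (c2 (k + 1) : Int) = (c2 k : Int) + k := by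
        have h : c2 (k + 1) = c2 k + k := rfl
        rw [h]; push_cast; ring
      have hc0 : (0:Int) ≤ (c2 (k + 1) : Int) := Int.natCast_nonneg _
      by_cases hM : M < 0
      · rw [QD_neg J M _ hM, PP_neg _ _ (by omega)]
      · by_cases hM0 : M = 0
        · subst hM0
          rw [QD_vanish J 0 (k + 1) (by
            push_cast [show c2 (k + 1 + 1) = c2 (k + 1) + (k + 1) from rfl]
            omega)]
          rcases Nat.eq_zero_or_pos k with rfl|hk
          · have h2 : PP (0 - 1 : Int) 1 = 0 := PP_neg _ _ (by omega)
            rw [show (0:Int) - (c2 1 : Int) = 0 from by norm_num [c2], PP_succ,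
              if_neg (by omega : ¬ (0:Int) < 0)]
            rw [show (0:Int) - (((0:Nat):Int) + 1) = 0 - 1 from by norm_num, h2,
              PP_neg _ _ (by omega : (0:Int) - 1 < 0)]
            ring
          · have hck : k ≤ c2 (k + 1) := by
              have h2 : c2 (k + 1) = c2 k + k := rfl
              omega
            have h1 : 1 ≤ c2 (k + 1) := by omega
            rw [PP_neg _ _ (by omega)]
        · have hM1 : 1 ≤ M := by omega
          obtain ⟨J', rfl⟩ : ∃ J', J = J' + 1 := ⟨J - 1, by omega⟩
          rw [QD_shift]
          have e1 := ihk (M - ((k:Int) + 1)).toNat (M - ((k:Int) + 1)) J' rfl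
            (by push_cast at hJ ⊢; omega)
          have e2 := ihm (M - ((k:Int) + 1)).toNat (by omega) (M - ((k:Int) + 1)) J' rfl
            (by push_cast at hJ ⊢; omega)
          rw [e1, e2]
          have a1 : M - ((k:Int) + 1) - (c2 k : Int) = (M - (c2 (k+1) : Int)) - 1 := by
            rw [hc]; ring
          have a2 : M - ((k:Int) + 1) - (c2 (k+1) : Int) = (M - (c2 (k+1) : Int)) - ((k:Int) + 1) := by
            ring
          rw [a1, a2]
          by_cases hm : M - (c2 (k+1) : Int) < 0
          · rw [PP_neg _ _ (by omega), PP_neg _ _ (by omega), PP_neg _ _ hm]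
            ring
          · rw [PP_succ (M - (c2 (k+1) : Int)) k, if_neg hm]

-- ---------- port bridges ----------

theorem getD_toList2 {α : Type} (a : Array α) (k : Nat) (d : α) : a.toList.getD k d = a.getD k d := by
  rw [List.getD_eq_getElem?_getD, Array.getD_eq_getD_getElem?, Array.getElem?_toList]

theorem arr_getD_set {α : Type} (a : Array α) (i j : Nat) (v d : α) (hi : i < a.size) :
    (a.setIfInBounds i v).getD j d = if j = i then v else a.getD j d := by
  rw [← getD_toList2, Array.toList_setIfInBounds, ← getD_toList2 a]
  simp only [List.getD_eq_getElem?_getD, List.getElem?_set]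
  rcases eq_or_ne j i with h|h
  · subst h; simp [hi]
  · simp [h, Ne.symm h]

theorem arr_getD_replicate {α : Type} (s : Nat) (v d : α) (i : Nat) :
    (Array.replicate s v).getD i d = if i < s then v else d := by
  rw [← getD_toList2, Array.toList_replicate]
  rcases Nat.lt_or_ge i s with h|h
  · rw [if_pos h, List.getD_eq_getElem?_getD, List.getElem?_replicate, if_pos h]; rfl
  · rw [if_neg (by omega), List.getD_eq_getElem?_getD, List.getElem?_replicate, if_neg (by omega)]; rfl

-- c2 bridges
theorem c2_cast_succ (k : Nat) : (c2 (k + 1) : Int) = (c2 k : Int) + k := by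
  have h : c2 (k + 1) = c2 k + k := rfl
  rw [h]; push_cast; ring

theorem c2_two_mul_int (k : Nat) : 2 * (c2 k : Int) = (k : Int) * ((k : Int) - 1) := by
  induction k with
  | zero => simp [c2]
  | succ k ih => rw [c2_cast_succ]; push_cast; ring_nf; ring_nf at ih; omega

theorem fdiv_c2 (k : Nat) : PySem.Int.floordiv ((k : Int) * ((k : Int) - 1)) 2 = (c2 k : Int) := by
  rw [(PySem.Int.floordiv_eq_iff_of_pos (by omega : (0:Int) < 2))]
  have := c2_two_mul_int k
  omega

-- the feasibility threshold f k = k(3k+1)/2 = 3*c2 k + 2k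
theorem fdiv_feas (k : Nat) :
    PySem.Int.floordiv (((k : Int) + 1) * (3 * ((k : Int) + 1) + 1)) 2
      = 3 * (c2 (k + 1) : Int) + 2 * ((k : Int) + 1) := by
  rw [(PySem.Int.floordiv_eq_iff_of_pos (by omega : (0:Int) < 2))]
  have h := c2_two_mul_int (k + 1)
  push_cast at h
  constructor
  · nlinarith [h]
  · nlinarith [h]

theorem feas_mono : ∀ d k : Nat, 3 * (c2 k : Int) + 2 * k ≤ 3 * (c2 (k + d) : Int) + 2 * (k + d) := by
  intro d
  induction d with
  | zero => intro k; simp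
  | succ d ih =>
    intro k
    have h := ih (k + 1)
    have hc := c2_cast_succ k
    have : k + 1 + d = k + (d + 1) := by omega
    rw [this] at h
    push_cast at h ⊢
    omega

theorem bKmax_spec (n : Int) (hn : 0 ≤ n) : ∀ fuel : Nat, ∀ k : Nat, (n + 1 - k) ≤ (fuel : Int) →
    3 * (c2 k : Int) + 2 * k ≤ n →
    3 * (c2 (bKmax n k) : Int) + 2 * (bKmax n k) ≤ n ∧
    n < 3 * (c2 (bKmax n k + 1) : Int) + 2 * ((bKmax n k : Int) + 1) := by
  intro fuel
  induction fuel with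
  | zero =>
    intro k hf hk
    rw [bKmax]
    have hno : ¬ PySem.Int.floordiv (((k : Int) + 1) * (3 * ((k : Int) + 1) + 1)) 2 ≤ n := by
      rw [fdiv_feas]
      have := c2_cast_succ k
      omega
    rw [dif_neg hno]
    rw [fdiv_feas] at hno
    push_cast
    exact ⟨hk, by omega⟩
  | succ fuel ih =>
    intro k hf hk
    rw [bKmax]
    by_cases hc : PySem.Int.floordiv (((k : Int) + 1) * (3 * ((k : Int) + 1) + 1)) 2 ≤ n
    · rw [dif_pos hc]
      rw [fdiv_feas] at hc
      exact ih (k + 1) (by push_cast; omega) (by push_cast at hc ⊢; omega)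
    · rw [dif_neg hc]
      rw [fdiv_feas] at hc
      push_cast
      exact ⟨hk, by omega⟩

-- PP facts used by the table
theorem PP_zrow : ∀ k : Nat, PP 0 k = if k = 0 then 1 else 0 := by
  intro k
  cases k with
  | zero => rw [PP_zero]; norm_num
  | succ k' =>
    rw [PP_succ, if_neg (by omega : ¬ (0:Int) < 0), PP_neg _ _ (by omega),
      PP_neg _ _ (by omega : (0:Int) - ((k':Int)+1) < 0)]
    simp

theorem PP_m0 (m : Int) (hm : 1 ≤ m) : PP m 0 = 0 := by
  rw [PP_zero, if_neg (by omega), if_neg (by omega)]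

theorem PP_rec (m : Int) (hm : 1 ≤ m) (k'' : Nat) :
    PP m (k'' + 1) = PP (m - 1) k'' +
      (if ((k'' : Int) + 1) ≤ m then PP (m - ((k'' : Int) + 1)) (k'' + 1) else 0) := by
  rw [PP_succ, if_neg (by omega)]
  by_cases h : ((k'' : Int) + 1) ≤ m
  · rw [if_pos h]
  · rw [if_neg h, PP_neg (m - ((k'':Int)+1)) (k''+1) (by omega)]

-- one write of the table-fill loop (the port's inner lambda)
def tStep (m : Int) (P : Array (Array Int)) (k : Int) : Array (Array Int) :=
  P.setIfInBounds m.toNat ((P.getD m.toNat #[]).setIfInBounds k.toNat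
    ((P.getD (m - 1).toNat #[]).getD (k - 1).toNat 0 +
      (if k ≤ m then (P.getD (m - k).toNat #[]).getD k.toNat 0 else 0)))

theorem tblRow (kmax : Nat) (m : Int) (hm : 1 ≤ m) :
    ∀ ks : Nat, ∀ k0 : Int, 1 ≤ k0 → (kmax : Int) + 1 - k0 ≤ (ks : Int) →
    ∀ P : Array (Array Int), m.toNat < P.size →
    (∀ i : Nat, i < P.size → (P.getD i #[]).size = kmax + 1) →
    (∀ m' : Int, 0 ≤ m' → m' < m → ∀ k' : Nat, k' ≤ kmax →
      ((P.getD m'.toNat #[]).getD k' 0) = PP m' k') →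
    (∀ k' : Nat, k' ≤ kmax → (k' : Int) < k0 → ((P.getD m.toNat #[]).getD k' 0) = PP m k') →
    (((PySem.List.pyRange k0 ((kmax : Int) + 1) 1).foldl (tStep m) P).size = P.size) ∧
    (∀ i : Nat, i ≠ m.toNat →
      ((PySem.List.pyRange k0 ((kmax : Int) + 1) 1).foldl (tStep m) P).getD i #[] = P.getD i #[]) ∧
    (∀ i : Nat, i < P.size →
      (((PySem.List.pyRange k0 ((kmax : Int) + 1) 1).foldl (tStep m) P).getD i #[]).size = kmax + 1) ∧
    (∀ k' : Nat, k' ≤ kmax →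
      ((((PySem.List.pyRange k0 ((kmax : Int) + 1) 1).foldl (tStep m) P).getD m.toNat #[]).getD k' 0)
        = PP m k') := by
  intro ks
  induction ks with
  | zero =>
    intro k0 hk0 hfuel P hmP hsz hprev hrow
    rw [PySem.List.pyRange_one_eq_nil (by omega)]
    exact ⟨rfl, fun _ _ => rfl, hsz, fun k' hk' => hrow k' hk' (by omega)⟩
  | succ ks ih =>
    intro k0 hk0 hfuel P hmP hsz hprev hrow
    by_cases hend : (kmax : Int) + 1 ≤ k0
    · rw [PySem.List.pyRange_one_eq_nil (by omega)]
      exact ⟨rfl, fun _ _ => rfl, hsz, fun k' hk' => hrow k' hk' (by omega)⟩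
    · rw [PySem.List.pyRange_one_cons (by omega), List.foldl_cons]
      -- the written value is PP m k0
      have hk0m : 1 ≤ k0 ∧ k0 ≤ (kmax : Int) := ⟨hk0, by omega⟩
      have hm1 : (0:Int) ≤ m - 1 ∧ m - 1 < m := by omega
      have hkc : ((k0.toNat - 1 : Nat) : Int) = k0 - 1 := by omega
      have hkc2 : ((k0.toNat : Nat) : Int) = k0 := by omega
      have hread1 : (P.getD (m - 1).toNat #[]).getD (k0 - 1).toNat 0 = PP (m - 1) (k0.toNat - 1) := by
        have := hprev (m - 1) (by omega) (by omega) (k0.toNat - 1) (by omega)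
        rw [← this]
        congr 1
        omega
      have hv : (P.getD (m - 1).toNat #[]).getD (k0 - 1).toNat 0 +
          (if k0 ≤ m then (P.getD (m - k0).toNat #[]).getD k0.toNat 0 else 0) = PP m k0.toNat := by
        set kc := k0.toNat - 1 with hkcdef
        have hkeq : k0.toNat = kc + 1 := by omega
        rw [hread1, hkeq, PP_rec m hm kc]
        congr 1
        rw [show ((kc : Nat) : Int) + 1 = k0 from by omega]
        by_cases hcm : k0 ≤ m
        · rw [if_pos hcm, if_pos hcm]
          exact hprev (m - k0) (by omega) (by omega) (kc + 1) (by omega)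
        · rw [if_neg hcm, if_neg hcm]
      -- properties of the updated array
      have hrowsz : (P.getD m.toNat #[]).size = kmax + 1 := hsz m.toNat hmP
      have hP' : ∀ i : Nat, (tStep m P k0).getD i #[] =
          if i = m.toNat then (P.getD m.toNat #[]).setIfInBounds k0.toNat
            ((P.getD (m - 1).toNat #[]).getD (k0 - 1).toNat 0 +
              (if k0 ≤ m then (P.getD (m - k0).toNat #[]).getD k0.toNat 0 else 0))
          else P.getD i #[] := by
        intro i
        rw [tStep, arr_getD_set _ _ _ _ _ hmP]
      have hsz' : (tStep m P k0).size = P.size := by rw [tStep]; simp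
      have hIH := ih (k0 + 1) (by omega) (by omega) (tStep m P k0)
        (by rw [hsz']; exact hmP)
        (by
          intro i hi
          rw [hsz'] at hi
          rw [hP' i]
          rcases eq_or_ne i m.toNat with h|h
          · rw [if_pos h]; simp only [Array.size_setIfInBounds]; exact hrowsz
          · rw [if_neg h]; exact hsz i hi)
        (by
          intro m' h0 hlt k' hk'
          rw [hP' m'.toNat, if_neg (by omega)]
          exact hprev m' h0 hlt k' hk')
        (by
          intro k' hk' hlt
          rw [hP' m.toNat, if_pos rfl,
            arr_getD_set _ _ _ _ _ (by rw [hrowsz]; omega)]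
          rcases eq_or_ne k' k0.toNat with h|h
          · rw [if_pos h, hv, h]
          · rw [if_neg h]
            exact hrow k' hk' (by omega))
      refine ⟨by rw [hIH.1, hsz'], ?_, ?_, ?_⟩
      · intro i hi
        rw [hIH.2.1 i hi, hP' i, if_neg hi]
      · intro i hi
        exact hIH.2.2.1 i (by rw [hsz']; exact hi)
      · exact hIH.2.2.2

theorem tblOuter (kmax : Nat) (mmax : Int) :
    ∀ ms : Nat, ∀ m0 : Int, 1 ≤ m0 → mmax + 1 - m0 ≤ (ms : Int) →
    ∀ P : Array (Array Int), P.size = (mmax + 1).toNat →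
    (∀ i : Nat, i < P.size → (P.getD i #[]).size = kmax + 1) →
    (∀ m' : Int, 0 ≤ m' → m' < m0 → ∀ k' : Nat, k' ≤ kmax →
      ((P.getD m'.toNat #[]).getD k' 0) = PP m' k') →
    (∀ m' : Int, m0 ≤ m' → m' ≤ mmax → ∀ k' : Nat, k' ≤ kmax →
      ((P.getD m'.toNat #[]).getD k' 0) = 0) →
    ∀ m' : Int, 0 ≤ m' → m' ≤ mmax → ∀ k' : Nat, k' ≤ kmax →
      ((((PySem.List.pyRange m0 (mmax + 1) 1).foldl
          (fun P m => (PySem.List.pyRange 1 ((kmax : Int) + 1) 1).foldl (tStep m) P) P).getD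
            m'.toNat #[]).getD k' 0) = PP m' k' := by
  intro ms
  induction ms with
  | zero =>
    intro m0 hm0 hfuel P hPsz hsz hdone hzero m' h0 hle k' hk'
    rw [show PySem.List.pyRange m0 (mmax + 1) 1 = [] from PySem.List.pyRange_one_eq_nil (by omega)]
    exact hdone m' h0 (by omega) k' hk'
  | succ ms ih =>
    intro m0 hm0 hfuel P hPsz hsz hdone hzero m' h0 hle k' hk'
    by_cases hend : mmax + 1 ≤ m0
    · rw [show PySem.List.pyRange m0 (mmax + 1) 1 = [] from PySem.List.pyRange_one_eq_nil (by omega)]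
      exact hdone m' h0 (by omega) k' hk'
    · rw [show PySem.List.pyRange m0 (mmax + 1) 1 = m0 :: PySem.List.pyRange (m0 + 1) (mmax + 1) 1
        from PySem.List.pyRange_one_cons (by omega), List.foldl_cons]
      have hm0P : m0.toNat < P.size := by rw [hPsz]; omega
      have hrow0 : ∀ k' : Nat, k' ≤ kmax → (k' : Int) < 1 → ((P.getD m0.toNat #[]).getD k' 0) = PP m0 k' := by
        intro k' hk' hlt
        have : k' = 0 := by omega
        subst this
        rw [hzero m0 (by omega) (by omega) 0 (by omega), PP_m0 m0 hm0]
      have hR := tblRow kmax m0 hm0 kmax 1 (by omega) (by omega) P hm0P hsz hdone hrow0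
      exact ih (m0 + 1) (by omega) (by omega) _
        (by rw [hR.1, hPsz])
        (by intro i hi; exact hR.2.2.1 i (by rw [← hR.1]; exact hi))
        (by
          intro m'' h0' hlt k'' hk''
          rcases eq_or_ne m'' m0 with h|h
          · subst h; exact hR.2.2.2 k'' hk''
          · rw [hR.2.1 m''.toNat (by omega)]
            exact hdone m'' h0' (by omega) k'' hk'')
        (by
          intro m'' hge hle' k'' hk''
          rw [hR.2.1 m''.toNat (by omega)]
          exact hzero m'' (by omega) hle' k'' hk'')
        m' h0 hle k' hk'

-- c2 k ≥ k - 1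
theorem c2_ge_pred : ∀ k : Nat, k - 1 ≤ c2 k := by
  intro k
  cases k with
  | zero => simp [c2]
  | succ k => show k + 1 - 1 ≤ c2 k + k; omega

-- floordiv by 3 is monotone in the numerator
theorem fdiv3_mono (a b : Int) (h : a ≤ b) :
    PySem.Int.floordiv a 3 ≤ PySem.Int.floordiv b 3 := by
  have ha := (PySem.Int.floordiv_eq_iff_of_pos (by omega : (0:Int) < 3)).mp
    (rfl : PySem.Int.floordiv a 3 = PySem.Int.floordiv a 3)
  have hb := (PySem.Int.floordiv_eq_iff_of_pos (by omega : (0:Int) < 3)).mp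
    (rfl : PySem.Int.floordiv b 3 = PySem.Int.floordiv b 3)
  omega

-- T vanishes on infeasible k (the k smallest parts already exceed n)
theorem T_vanish_feas (xk : Nat) (n : Int) (k : Nat)
    (hinf : n < 3 * (c2 k : Int) + 2 * k) : T xk n k = 0 := by
  by_cases hdvd : (3:Int) ∣ (n + k)
  · obtain ⟨M, hM⟩ := hdvd
    rw [show n = 3 * M - (k : Int) from by omega, T_eq_QD]
    refine QD_vanish xk M k ?_
    rw [c2_cast_succ]
    omega
  · exact T_ndvd xk n k hdvd

-- the summation loop, as the initial value plus a mapped sum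
theorem ansFold (P : Array (Array Int)) (n : Int) :
    ∀ (l : List Int) (a : Int),
    l.foldl (fun ans k =>
      if PySem.Int.mod (n + k) 3 = 0 then
        let m := PySem.Int.floordiv (n + k) 3 - PySem.Int.floordiv (k * (k - 1)) 2
        if 0 ≤ m then ans + (P.getD m.toNat #[]).getD k.toNat 0 else ans
      else ans) a
    = a + (l.map (fun k =>
        if PySem.Int.mod (n + k) 3 = 0 then
          (let m := PySem.Int.floordiv (n + k) 3 - PySem.Int.floordiv (k * (k - 1)) 2
           if 0 ≤ m then (P.getD m.toNat #[]).getD k.toNat 0 else 0)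
        else 0)).sum := by
  intro l
  induction l with
  | nil => intro a; simp
  | cons k l ih =>
    intro a
    simp only [List.foldl_cons, List.map_cons, List.sum_cons, ih]
    split_ifs <;> ring

theorem sum_pyRange_map (f : Int → Int) : ∀ Kn : Nat,
    ((PySem.List.pyRange 1 ((Kn : Int) + 1) 1).map f).sum = ∑ k ∈ Finset.range Kn, f ((k : Int) + 1) := by
  intro Kn
  induction Kn with
  | zero =>
    rw [show ((0:Nat):Int) + 1 = 1 from by norm_num,
      PySem.List.pyRange_one_eq_nil (by omega)]
    simp
  | succ Kn ih =>
    rw [show ((Kn+1:Nat):Int) + 1 = ((Kn:Int) + 1) + 1 from by push_cast; ring,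
      PySem.List.pyRange_one_succ_right (by omega), List.map_append, List.sum_append,
      Finset.sum_range_succ, ih]
    simp

theorem mainB (n : Int) (hn : 0 ≤ n) :
    houseOfCards_alt n = W (PySem.Int.floordiv (n + 1) 3).toNat n := by
  rw [houseOfCards_alt, if_neg (by omega)]
  dsimp only
  have hx := (PySem.Int.floordiv_eq_iff_of_pos (by omega : (0:Int) < 3)).mp
    (rfl : PySem.Int.floordiv (n + 1) 3 = PySem.Int.floordiv (n + 1) 3)
  set x := PySem.Int.floordiv (n + 1) 3 with hxdef
  have hx0 : 0 ≤ x := by omega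
  set xk := x.toNat with hxkdef
  set kmax := bKmax n 0 with hkmaxdef
  have hbk := bKmax_spec n hn (n + 1).toNat 0 (by omega) (by simp [c2]; exact hn)
  rw [← hkmaxdef] at hbk
  have hc2g := c2_ge_pred kmax
  have hkx : kmax ≤ xk := by
    have h1 : ((kmax - 1 : Nat) : Int) ≤ (c2 kmax : Int) := by exact_mod_cast hc2g
    omega
  set mmax := PySem.Int.floordiv (n + (kmax : Int)) 3 with hmmaxdef
  have hmmax := (PySem.Int.floordiv_eq_iff_of_pos (by omega : (0:Int) < 3)).mp
    (rfl : PySem.Int.floordiv (n + (kmax : Int)) 3 = mmax)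
  have hmmax0 : 0 ≤ mmax := by omega
  -- table correctness
  set P0 : Array (Array Int) :=
    Array.replicate (mmax + 1).toNat (Array.replicate (kmax + 1) (0 : Int)) with hP0
  set P1 := P0.setIfInBounds 0 ((P0.getD 0 #[]).setIfInBounds 0 1) with hP1
  have hP0sz : P0.size = (mmax + 1).toNat := by rw [hP0]; simp
  have hszpos : 0 < P0.size := by rw [hP0sz]; omega
  have hP0row : ∀ i : Nat, i < P0.size → P0.getD i #[] = Array.replicate (kmax + 1) (0 : Int) := by
    intro i hi
    rw [hP0, arr_getD_replicate, if_pos (by rw [hP0sz] at hi; exact hi)]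
  have hP1get : ∀ i : Nat, P1.getD i #[] =
      if i = 0 then (P0.getD 0 #[]).setIfInBounds 0 1 else P0.getD i #[] := by
    intro i
    rw [hP1, arr_getD_set _ _ _ _ _ hszpos]
  have hrow0 : ∀ k' : Nat, k' ≤ kmax → ((P1.getD 0 #[]).getD k' 0) = PP 0 k' := by
    intro k' hk'
    rw [hP1get, if_pos rfl, hP0row 0 hszpos,
      arr_getD_set _ _ _ _ _ (by simp), arr_getD_replicate, PP_zrow]
    rcases eq_or_ne k' 0 with h|h
    · rw [if_pos h, if_pos h]
    · rw [if_neg h, if_neg h, if_pos (by omega)]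
  have htbl := tblOuter kmax mmax (mmax + 1).toNat 1 (by omega) (by omega) P1
    (by rw [hP1]; simp [hP0sz])
    (by
      intro i hi
      rw [hP1get]
      rcases eq_or_ne i 0 with h|h
      · rw [if_pos h, hP0row 0 hszpos]; simp
      · rw [if_neg h, hP0row i (by rw [hP1] at hi; simpa using hi)]; simp)
    (by
      intro m' h0 hlt k' hk'
      have : m' = 0 := by omega
      subst this
      exact hrow0 k' hk')
    (by
      intro m' hge hle k' hk'
      rw [hP1get, if_neg (by omega), hP0row m'.toNat (by rw [hP0sz]; omega), arr_getD_replicate,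
        if_pos (by omega)])
  -- the summation loop
  rw [ansFold, sum_pyRange_map]
  rw [W_eq_sumT xk n, Finset.sum_range_succ', T_k0]
  rw [add_comm (∑ i ∈ Finset.range xk, T xk n (i + 1)) (if n = 0 then 1 else 0)]
  congr 1
  -- compare the two sums over k
  have hsub : Finset.range kmax ⊆ Finset.range xk := by
    intro a ha
    rw [Finset.mem_range] at *
    omega
  rw [← Finset.sum_subset hsub (by
    intro kN _ hnot
    simp only [Finset.mem_range, not_lt] at hnot
    refine T_vanish_feas xk n (kN + 1) ?_
    have hmono := feas_mono (kN - kmax) (kmax + 1)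
    rw [show kmax + 1 + (kN - kmax) = kN + 1 from by omega] at hmono
    push_cast at hmono ⊢
    omega)]
  refine Finset.sum_congr rfl ?_
  intro kN hkN
  simp only [Finset.mem_range] at hkN
  set k : Int := (kN : Int) + 1 with hkdef
  by_cases hmod : PySem.Int.mod (n + k) 3 = 0
  · rw [if_pos hmod]
    have hdvd : (3:Int) ∣ (n + k) := (PySem.Int.mod_eq_zero_iff_dvd _ _).mp hmod
    set M := PySem.Int.floordiv (n + k) 3 with hMdef
    have hMb := (PySem.Int.floordiv_eq_iff_of_pos (by omega : (0:Int) < 3)).mp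
      (rfl : PySem.Int.floordiv (n + k) 3 = M)
    have hM3 : 3 * M = n + k := by omega
    have hfc2 : PySem.Int.floordiv (k * (k - 1)) 2 = (c2 (kN + 1) : Int) := by
      rw [show k = ((kN + 1 : Nat) : Int) from by push_cast; ring]
      exact fdiv_c2 (kN + 1)
    rw [hfc2]
    -- T-side value
    have hTQ : T xk n (kN + 1) = QD xk M (kN + 1) := by
      rw [show n = 3 * M - ((kN + 1 : Nat) : Int) from by push_cast; omega, T_eq_QD]
    have hlift := QD_lift M (kN + 1) (M.toNat + (kN + 1)) xk
      (by push_cast; omega)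
    have hQP := QD_eq_PP (kN + 1) M.toNat M (xk + (M.toNat + (kN + 1))) rfl
      (by push_cast; omega)
    rw [hTQ, ← hlift, hQP]
    by_cases hm : 0 ≤ M - (c2 (kN + 1) : Int)
    · rw [if_pos hm]
      have hMmm : M ≤ mmax := fdiv3_mono _ _ (by push_cast; omega)
      have := htbl (M - (c2 (kN + 1) : Int)) hm (by omega) (kN + 1) (by omega)
      rw [show k.toNat = kN + 1 from by omega]
      exact this
    · rw [if_neg hm, PP_neg _ _ (by omega)]
  · rw [if_neg hmod]
    have hdvd : ¬ (3:Int) ∣ (n + k) :=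
      fun h => hmod ((PySem.Int.mod_eq_zero_iff_dvd _ _).mpr h)
    rw [T_ndvd xk n (kN + 1) (by push_cast at hdvd ⊢; exact hdvd)]

theorem main (n : Int) (hn : 0 ≤ n) : houseOfCards n = houseOfCards_alt n := by
  have hx := (PySem.Int.floordiv_eq_iff_of_pos (by omega : (0:Int) < 3)).mp
    (rfl : PySem.Int.floordiv (n + 1) 3 = PySem.Int.floordiv (n + 1) 3)
  rw [mainA n hn, mainB n hn,
    show PySem.Int.floordiv (n + 1) 3 + 1
      = (((PySem.Int.floordiv (n + 1) 3).toNat : Nat) : Int) + 1 from by omega,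
    countW_prefix]

-- ===== VERDICT (by name: the statement is the Claim_ definition above) =====
theorem houseOfCards_spec : Claim_equal_houseOfCards := by
  intro n _ hpre
  exact main n hpre
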